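-- pv_equiv track=rewrite | github.com/Arman-Alam-8694/CODEFORCES | 2021-A-meaning-mean/code.py | solve
-- ===== SOURCE A (Python) =====
-- def solve(n,array):
--     array.sort()
--     while len(array)!=1:
--         average=(array[0]+array[1])//2
--         array.pop(0)
--         array.pop(0)
--         array.append(average)
--         array.sort()
--     return array[0]
-- ===== SOURCE B (Python) =====
-- def solve(n, array):
--     xs = sorted(array)
--     acc = xs[0]
--     for x in xs[1:]:
--         acc = (acc + x) // 2
--     return acc
-- ===== Notes on version B (the rewrite author's own statement) =====
-- stated objective: faster
-- what changed: A re-sorts the whole list after every merge of the two smallest; B sorts once and observes that the floored average of the two smallest is never larger than any remaining element, so one left fold over the sorted list yields the same result.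
import Mathlib
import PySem

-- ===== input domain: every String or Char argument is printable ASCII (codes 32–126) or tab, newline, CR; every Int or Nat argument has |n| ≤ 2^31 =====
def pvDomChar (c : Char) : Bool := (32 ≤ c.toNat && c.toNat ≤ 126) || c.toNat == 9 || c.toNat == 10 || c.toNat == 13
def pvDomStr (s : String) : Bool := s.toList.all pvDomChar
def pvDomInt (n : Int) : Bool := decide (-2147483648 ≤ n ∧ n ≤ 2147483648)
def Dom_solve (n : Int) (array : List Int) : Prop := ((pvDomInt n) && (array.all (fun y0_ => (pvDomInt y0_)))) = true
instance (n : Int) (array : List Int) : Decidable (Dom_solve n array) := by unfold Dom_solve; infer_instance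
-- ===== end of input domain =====

-- B sorts once and folds the floored average left-to-right instead of re-sorting after
-- every merge (objective: faster, asymptotic).  A sorts its argument in place (mutation);
-- the equivalence proved here is about the return value only.

-- ===== PORT A =====
-- the while-loop of A: combine the two smallest, append the floored average, re-sort
def solveLoopA : List Int → List Int
  | a :: b :: rest =>
      solveLoopA (PySem.List.sorted (rest ++ [PySem.Int.floordiv (a + b) 2]) (fun x => x) false)
  | xs => xs
termination_by xs => xs.length
decreasing_by simp [PySem.List.length_sorted]

def solve (n : Int) (array : List Int) : Int :=
  -- array[0] after the loop; IndexError on the empty list is excluded by Pre_solve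
  (PySem.List.pyGet? (solveLoopA (PySem.List.sorted array (fun x => x) false)) 0).getD 0

-- ===== PORT B =====
def solve_alt (n : Int) (array : List Int) : Int :=
  match PySem.List.sorted array (fun x => x) false with
  | [] => 0   -- xs[0] raises IndexError in Source B; excluded by Pre_solve
  | h :: t => t.foldl (fun acc x => PySem.Int.floordiv (acc + x) 2) h

-- ===== PRECONDITION & SPEC =====
-- Pre_ excludes only the empty list, on which A (and B) raise IndexError.
def Pre_solve (n : Int) (array : List Int) : Prop := array ≠ []
instance (n : Int) (array : List Int) : Decidable (Pre_solve n array) := by unfold Pre_solve; infer_instance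
def pvWitness_solve : Int × List Int := (3, [5, 1, 3])

def Spec_solve (n : Int) (array : List Int) (out : Int) : Prop := out = solve_alt n array
instance (n : Int) (array : List Int) (out : Int) : Decidable (Spec_solve n array out) := by unfold Spec_solve; infer_instance

-- ===== CLAIM (what is proved, stated in full; the proofs are below) =====
def Claim_equal_solve : Prop := ∀ (n : Int) (array : List Int), Dom_solve n array → Pre_solve n array → Spec_solve n array (solve n array)

-- ===== LEMMAS AND PROOFS =====

-- the floored average of the two smallest stays ≤ every remaining element,
-- so re-sorting just puts it in front
lemma avg_le {a b : Int} (h : a ≤ b) : PySem.Int.floordiv (a + b) 2 ≤ b := by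
  have := (PySem.Int.floordiv_two_mid_bounds h).2
  exact this

lemma sorted_after_merge (a b : Int) (rest : List Int)
    (hp : (a :: b :: rest).Pairwise (· ≤ ·)) :
    PySem.List.sorted (rest ++ [PySem.Int.floordiv (a + b) 2]) (fun x => x) false
      = PySem.Int.floordiv (a + b) 2 :: rest := by
  apply PySem.List.sorted_id_eq_of_perm_of_pairwise
  · exact (List.perm_append_singleton _ _).symm
  · rcases hp with _ | ⟨ha, hp⟩
    rcases hp with _ | ⟨hb, hrest⟩
    refine List.Pairwise.cons ?_ hrest
    intro y hy
    exact le_trans (avg_le (ha b (by simp))) (hb y hy)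

-- loop ↔ fold on a sorted list
lemma loop_eq_fold (t : List Int) : ∀ (h : Int), (h :: t).Pairwise (· ≤ ·) →
    solveLoopA (h :: t) = [t.foldl (fun acc x => PySem.Int.floordiv (acc + x) 2) h] := by
  induction t with
  | nil => intro h _; simp [solveLoopA]
  | cons b rest ih =>
      intro h hp
      rw [solveLoopA, sorted_after_merge h b rest hp]
      rw [ih _ ?_]
      · simp [List.foldl]
      · rcases hp with _ | ⟨ha, hp⟩
        rcases hp with _ | ⟨hb, hrest⟩
        refine List.Pairwise.cons ?_ hrest
        intro y hy
        exact le_trans (avg_le (ha b (by simp))) (hb y hy)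

-- ===== VERDICT (by name: the statement is the Claim_ definition above) =====
theorem solve_spec : Claim_equal_solve := by
  intro n array _ hpre
  unfold Spec_solve solve solve_alt
  rcases hs : PySem.List.sorted array (fun x => x) false with _ | ⟨h, t⟩
  · exact absurd (((PySem.List.sorted_eq_nil_iff _ _ _).mp hs)) hpre
  · have hp : (h :: t).Pairwise (· ≤ ·) := by
      have := PySem.List.sorted_pairwise (xs := array) (key := fun x : Int => x)
      rw [hs] at this; exact this
    rw [loop_eq_fold t h hp]
    simp [PySem.List.pyGet?, PySem.List.pyIdx?]
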